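-- pv_equiv track=rewrite | github.com/krizzo101/master_root | libs/opsvi-shared/opsvi_shared/tools/code_generation/o3_code_generator/data_flow_designer.py | _extract_data_destinations
-- ===== SOURCE A (Python) =====
-- from typing import Any
--
-- def _extract_data_destinations(text: str) -> list[dict[str, Any]]:
--     """Extract data destinations from requirements."""
--     destinations: list[dict[str, Any]] = []
--     if any(token in text for token in ("warehouse", "analytics", "reporting")):
--         destinations.append(
--             {
--                 "type": "data_warehouse",
--                 "name": "Analytics Warehouse",
--                 "purpose": "analytics",
--             }
--         )
--     else:
--         pass
--     if any(token in text for token in ("lake", "storage", "archive")):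
--         destinations.append(
--             {"type": "data_lake", "name": "Data Lake", "purpose": "storage"}
--         )
--     else:
--         pass
--     if any(token in text for token in ("cache", "redis", "memory")):
--         destinations.append(
--             {"type": "cache", "name": "Cache Store", "purpose": "performance"}
--         )
--     else:
--         pass
--     return destinations
-- ===== SOURCE B (Python) =====
-- # Single left-to-right scan: walk the text once, and at each position mark the
-- # destination category of any token that starts there; finally emit the marked
-- # categories' result dicts in fixed order.
--
-- _TOKEN_RULE = [
--     ("warehouse", 0), ("analytics", 0), ("reporting", 0),
--     ("lake", 1), ("storage", 1), ("archive", 1),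
--     ("cache", 2), ("redis", 2), ("memory", 2),
-- ]
--
-- _RESULTS = [
--     {"type": "data_warehouse", "name": "Analytics Warehouse", "purpose": "analytics"},
--     {"type": "data_lake", "name": "Data Lake", "purpose": "storage"},
--     {"type": "cache", "name": "Cache Store", "purpose": "performance"},
-- ]
--
-- def _extract_data_destinations(text: str) -> list:
--     """Extract data destinations from requirements (one scan over the text)."""
--     found = set()
--     for i in range(len(text)):
--         for tok, idx in _TOKEN_RULE:
--             if idx not in found and text.startswith(tok, i):
--                 found.add(idx)
--     return [dict(_RESULTS[idx]) for idx in (0, 1, 2) if idx in found]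
-- ===== Notes on version B (the rewrite author's own statement) =====
-- stated objective: alternative
-- what changed: Instead of three independent substring-membership tests (one pass over the text per token), B makes a single left-to-right scan of the text, marking in a set the category of any token that starts at the current position, then emits the marked categories' dicts in fixed order.
import Mathlib
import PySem

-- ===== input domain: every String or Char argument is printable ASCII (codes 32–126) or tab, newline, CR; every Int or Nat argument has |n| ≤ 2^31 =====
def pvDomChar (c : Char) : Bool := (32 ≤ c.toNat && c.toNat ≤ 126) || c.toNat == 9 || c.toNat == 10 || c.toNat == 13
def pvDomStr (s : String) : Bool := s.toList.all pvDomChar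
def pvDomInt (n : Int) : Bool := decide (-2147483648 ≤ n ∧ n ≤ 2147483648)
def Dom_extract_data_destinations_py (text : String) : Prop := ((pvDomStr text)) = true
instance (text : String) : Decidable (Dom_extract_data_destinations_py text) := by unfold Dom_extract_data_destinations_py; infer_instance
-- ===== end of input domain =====

-- B replaces A's three independent substring-membership tests by one left-to-right scan of
-- the text that marks, in a set, the category of any token starting at the current position
-- (objective: alternative; same cost).

-- ===== PORT A =====
-- literal transliteration: three sequential token checks, each appending one dict
def extract_data_destinations_py (text : String) : List (List (String × String)) :=
  let destinations : List (List (String × String)) := []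
  let destinations :=
    if ["warehouse", "analytics", "reporting"].any (fun token => PySem.Str.isIn token text) then
      destinations ++ [[("type", "data_warehouse"), ("name", "Analytics Warehouse"), ("purpose", "analytics")]]
    else destinations
  let destinations :=
    if ["lake", "storage", "archive"].any (fun token => PySem.Str.isIn token text) then
      destinations ++ [[("type", "data_lake"), ("name", "Data Lake"), ("purpose", "storage")]]
    else destinations
  let destinations :=
    if ["cache", "redis", "memory"].any (fun token => PySem.Str.isIn token text) then
      destinations ++ [[("type", "cache"), ("name", "Cache Store"), ("purpose", "performance")]]
    else destinations
  destinations

-- ===== PORT B =====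
-- Source B's token → category table
def pvTokenRule : List (String × Nat) :=
  [("warehouse", 0), ("analytics", 0), ("reporting", 0),
   ("lake", 1), ("storage", 1), ("archive", 1),
   ("cache", 2), ("redis", 2), ("memory", 2)]

-- Source B's fixed result dicts
def pvResults : List (List (String × String)) :=
  [[("type", "data_warehouse"), ("name", "Analytics Warehouse"), ("purpose", "analytics")],
   [("type", "data_lake"), ("name", "Data Lake"), ("purpose", "storage")],
   [("type", "cache"), ("name", "Cache Store"), ("purpose", "performance")]]

-- one position of the scan: the inner 'for tok, idx in _TOKEN_RULE' loop.
-- text.startswith(tok, i) with 0 ≤ i is exactly 'tok is a prefix of text[i:]',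
-- ported as PySem.Chars.startswith on the dropped character list (exact there).
def pvScanStep (text : String) (found : PySem.Set Nat) (i : Nat) : PySem.Set Nat :=
  pvTokenRule.foldl
    (fun f p =>
      if !(PySem.Set.contains f p.2) && PySem.Chars.startswith (text.toList.drop i) p.1.toList
      then PySem.Set.add f p.2 else f)
    found

-- the single scan of Source B, then the final comprehension over (0, 1, 2)
def extract_data_destinations_py_alt (text : String) : List (List (String × String)) :=
  let found := (List.range text.length).foldl (pvScanStep text) PySem.Set.empty
  ([0, 1, 2].filter (fun idx => PySem.Set.contains found idx)).map (fun idx => pvResults.getD idx [])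

-- ===== PRECONDITION & SPEC =====
def Spec_extract_data_destinations_py (text : String) (out : List (List (String × String))) : Prop := out = extract_data_destinations_py_alt text
instance (text : String) (out : List (List (String × String))) : Decidable (Spec_extract_data_destinations_py text out) := by unfold Spec_extract_data_destinations_py; infer_instance

-- ===== CLAIM (what is proved, stated in full; the proofs are below) =====
def Claim_equal_extract_data_destinations_py : Prop := ∀ (text : String), Dom_extract_data_destinations_py text → Spec_extract_data_destinations_py text (extract_data_destinations_py text)

-- ===== LEMMAS AND PROOFS =====

-- a token of category idx starts at position i
def pvHit (text : String) (idx : Nat) (i : Nat) : Prop :=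
  ∃ p ∈ pvTokenRule, p.2 = idx ∧ PySem.Chars.startswith (text.toList.drop i) p.1.toList = true

theorem pv_contains_iff (s : PySem.Set Nat) (x : Nat) : PySem.Set.contains s x = true ↔ x ∈ s := by
  simp [PySem.Set.contains]

-- membership after the inner token loop
theorem pv_inner_mem (text : String) (i : Nat) (l : List (String × Nat)) (found : PySem.Set Nat) (idx : Nat) :
    idx ∈ l.foldl
      (fun f p =>
        if !(PySem.Set.contains f p.2) && PySem.Chars.startswith (text.toList.drop i) p.1.toList
        then PySem.Set.add f p.2 else f) found
    ↔ idx ∈ found ∨ ∃ p ∈ l, p.2 = idx ∧ PySem.Chars.startswith (text.toList.drop i) p.1.toList = true := by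
  induction l generalizing found with
  | nil => simp
  | cons p l ih =>
    simp only [List.foldl_cons]
    split
    · next h =>
      rw [ih]
      simp only [Bool.and_eq_true, Bool.not_eq_true'] at h
      simp [PySem.Set.mem_add]
      constructor
      · rintro (h' | h' | h') <;> tauto
      · rintro (h' | ⟨h1, h2⟩ | h') <;> tauto
    · next h =>
      rw [ih]
      simp only [Bool.and_eq_true, Bool.not_eq_true', not_and_or] at h
      simp
      constructor
      · tauto
      · rintro (h' | ⟨h1, h2⟩ | h')
        · tauto
        · rcases h with h | h
          · left
            have hc : PySem.Set.contains found p.2 = true := by simpa using h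
            exact h1 ▸ (pv_contains_iff found p.2).mp hc
          · simp [h] at h2
        · tauto

-- one scan position in terms of pvHit
theorem pv_step_mem (text : String) (found : PySem.Set Nat) (i : Nat) (idx : Nat) :
    idx ∈ pvScanStep text found i ↔ idx ∈ found ∨ pvHit text idx i := by
  unfold pvScanStep pvHit
  exact pv_inner_mem text i pvTokenRule found idx

-- membership after the outer scan over positions
theorem pv_scan_mem (text : String) (n : Nat) (s : PySem.Set Nat) (idx : Nat) :
    idx ∈ (List.range n).foldl (pvScanStep text) s ↔ idx ∈ s ∨ ∃ i < n, pvHit text idx i := by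
  induction n generalizing s with
  | zero => simp
  | succ n ih =>
    rw [List.range_succ, List.foldl_append, List.foldl_cons, List.foldl_nil, pv_step_mem, ih]
    constructor
    · rintro (⟨h | ⟨i, hi, hh⟩⟩ | hh)
      · exact Or.inl h
      · exact Or.inr ⟨i, by omega, hh⟩
      · exact Or.inr ⟨n, by omega, hh⟩
    · rintro (h | ⟨i, hi, hh⟩)
      · exact Or.inl (Or.inl h)
      · rcases Nat.lt_succ_iff_lt_or_eq.mp hi with h' | h'
        · exact Or.inl (Or.inr ⟨i, h', hh⟩)
        · subst h'; exact Or.inr hh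

-- a nonempty token is a prefix at some position below the length iff it occurs in the text
theorem pv_exists_prefix (tok : List Char) (h : tok ≠ []) (cs : List Char) :
    (∃ i, i < cs.length ∧ PySem.Chars.startswith (cs.drop i) tok = true)
    ↔ PySem.Chars.isIn tok cs = true := by
  simp only [PySem.Chars.startswith_iff]
  constructor
  · rintro ⟨i, _, hp⟩
    exact (PySem.Chars.exists_prefix_drop_iff_isIn tok cs).mp ⟨i, hp⟩
  · intro hin
    obtain ⟨j, hp⟩ := (PySem.Chars.exists_prefix_drop_iff_isIn tok cs).mpr hin
    refine ⟨j, ?_, hp⟩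
    by_contra hj
    rw [List.drop_eq_nil_of_le (by omega)] at hp
    exact h (List.prefix_nil.mp hp)

-- the scan found category idx iff one of its tokens occurs in the text
theorem pv_found_eq (text : String) (idx : Nat) (toks : List String)
    (hta : ∀ p ∈ pvTokenRule, p.2 = idx → p.1 ∈ toks)
    (hnd : ∀ t ∈ toks, t.toList ≠ [])
    (htk : ∀ t ∈ toks, (t, idx) ∈ pvTokenRule) :
    PySem.Set.contains ((List.range text.length).foldl (pvScanStep text) PySem.Set.empty) idx
      = toks.any (fun t => PySem.Str.isIn t text) := by
  rw [Bool.eq_iff_iff, pv_contains_iff, pv_scan_mem]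
  simp only [PySem.Set.empty, List.not_mem_nil, false_or, List.any_eq_true, PySem.Str.isIn_eq, pvHit]
  have hlen : text.length = text.toList.length := rfl
  constructor
  · rintro ⟨i, hi, p, hp, hpi, hsw⟩
    refine ⟨p.1, hta p hp hpi, ?_⟩
    rw [← pv_exists_prefix p.1.toList (hnd _ (hta p hp hpi)) text.toList]
    exact ⟨i, by omega, hsw⟩
  · rintro ⟨t, ht, hin⟩
    obtain ⟨i, hi, hsw⟩ := (pv_exists_prefix t.toList (hnd t ht) text.toList).mpr hin
    exact ⟨i, by omega, (t, idx), htk t ht, rfl, hsw⟩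

-- ===== VERDICT (by name: the statement is the Claim_ definition above) =====
theorem extract_data_destinations_py_spec : Claim_equal_extract_data_destinations_py := by
  intro text _
  have e0 := pv_found_eq text 0 ["warehouse", "analytics", "reporting"] (by decide) (by decide) (by decide)
  have e1 := pv_found_eq text 1 ["lake", "storage", "archive"] (by decide) (by decide) (by decide)
  have e2 := pv_found_eq text 2 ["cache", "redis", "memory"] (by decide) (by decide) (by decide)
  simp only [List.any_cons, List.any_nil, Bool.or_false] at e0 e1 e2
  show extract_data_destinations_py text = extract_data_destinations_py_alt text
  simp only [extract_data_destinations_py, extract_data_destinations_py_alt,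
             List.any_cons, List.any_nil, Bool.or_false, List.filter_cons, List.filter_nil,
             e0, e1, e2]
  cases hc0 : (PySem.Str.isIn "warehouse" text || (PySem.Str.isIn "analytics" text || PySem.Str.isIn "reporting" text)) <;>
  cases hc1 : (PySem.Str.isIn "lake" text || (PySem.Str.isIn "storage" text || PySem.Str.isIn "archive" text)) <;>
  cases hc2 : (PySem.Str.isIn "cache" text || (PySem.Str.isIn "redis" text || PySem.Str.isIn "memory" text)) <;>
    simp [hc0, hc1, hc2, pvResults]
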